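-- pv_equiv track=rewrite | github.com/glasgow-ipl/ips-protodesc-code | npt/parser_rfc_txt.py | depaginate
-- ===== SOURCE A (Python) =====
-- from typing import Dict, List
--
-- def depaginate(lines : List[str]) -> List[str]:
--     depaginated_lines = []
--     for i in range(len(lines)):
--         line_no = i - (56 * int(i/56))
--         if line_no not in [53, 54, 55, 0, 1, 2]:
--             if line_no == 52 and i+8 < len(lines):
--                 indent_prev = len(lines[i-1]) - len(lines[i-1].lstrip())
--                 indent_next = len(lines[i+8]) - len(lines[i+8].lstrip())
--                 if (indent_prev == indent_next):
--                     continue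
--             depaginated_lines.append(lines[i])
--     return depaginated_lines
-- ===== SOURCE B (Python) =====
-- def depaginate(lines):
--     # Slice-based: cut the text into 56-line pages, take each page's body
--     # slice [3:53], and trim the page-break line by peeking at the next page.
--     pages = [lines[i:i + 56] for i in range(0, len(lines), 56)]
--     out = []
--     for k, page in enumerate(pages):
--         body = page[3:53]
--         if k + 1 < len(pages) and len(pages[k + 1]) >= 5:
--             prev, nxt = page[51], pages[k + 1][4]
--             if len(prev) - len(prev.lstrip()) == len(nxt) - len(nxt.lstrip()):
--                 body = body[:-1]
--         out += body
--     return out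
-- ===== Notes on version B (the rewrite author's own statement) =====
-- stated objective: faster
-- what changed: Replaces A's flat per-line loop (modulo arithmetic and a skip-list membership test on every index) with a slice-based page decomposition: cut the text into 56-line page slices, keep each page's body slice [3:53] wholesale, and trim the page-break line by peeking at line 4 of the next page.
import Mathlib
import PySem

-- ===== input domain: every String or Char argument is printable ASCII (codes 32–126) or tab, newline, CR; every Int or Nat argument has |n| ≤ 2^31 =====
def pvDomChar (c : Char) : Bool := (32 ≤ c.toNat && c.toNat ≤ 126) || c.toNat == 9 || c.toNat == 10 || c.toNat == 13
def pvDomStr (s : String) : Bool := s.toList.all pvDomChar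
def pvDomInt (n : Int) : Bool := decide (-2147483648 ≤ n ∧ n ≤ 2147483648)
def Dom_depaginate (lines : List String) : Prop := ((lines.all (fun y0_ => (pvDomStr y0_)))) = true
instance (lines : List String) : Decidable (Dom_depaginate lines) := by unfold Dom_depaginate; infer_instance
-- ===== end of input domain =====

-- B replaces A's flat index loop (per-line modulo and skip-list membership) by cutting the text
-- into 56-line page slices and keeping each page's body slice, trimming the break line by peeking
-- at the next page (objective: alternative, slice-based decomposition).

-- ===== PORT A =====
-- len(s) - len(s.lstrip()) : the indentation width of a line (used verbatim by both Pythons)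
def pvIndent (s : String) : Int := PySem.Str.len s - PySem.Str.len (PySem.Str.lstrip s)

-- loop body of A: one step for global index i (line_no = i - 56*int(i/56))
def depagStepA (lines : List String) (acc : List String) (i : Int) : List String :=
  let lineNo := i - 56 * PySem.Int.truncdiv i 56
  if lineNo ∉ ([53, 54, 55, 0, 1, 2] : List Int) then
    if lineNo = 52 ∧ i + 8 < (lines.length : Int) then
      if pvIndent (PySem.List.pyGetD lines (i - 1) "") = pvIndent (PySem.List.pyGetD lines (i + 8) "") then
        acc
      else acc ++ [PySem.List.pyGetD lines i ""]
    else acc ++ [PySem.List.pyGetD lines i ""]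
  else acc

def depaginate (lines : List String) : List String :=
  (PySem.List.pyRange 0 (lines.length : Int) 1).foldl (depagStepA lines) []

-- ===== PORT B =====
-- pages = [lines[i:i+56] for i in range(0, len(lines), 56)]
def depagPages (lines : List String) : List (List String) :=
  (PySem.List.pyRange 0 (lines.length : Int) 56).map
    (fun i => PySem.List.slice lines (some i) (some (i + 56)))

-- the body contributed by one enumerated page (k, page): page[3:53], trimmed by body[:-1]
-- when the next page exists, has ≥ 5 lines, and the indents of page[51] and pages[k+1][4] agree
-- (pages[k+1] is in range under the guard, so the total pyGetD with default [] is exact)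
def depagChunkB (pages : List (List String)) (kp : Int × List String) : List String :=
  let body := PySem.List.slice kp.2 (some 3) (some 53)
  if kp.1 + 1 < (pages.length : Int) ∧ 5 ≤ (PySem.List.pyGetD pages (kp.1 + 1) []).length then
    if pvIndent (PySem.List.pyGetD kp.2 51 "") =
        pvIndent (PySem.List.pyGetD (PySem.List.pyGetD pages (kp.1 + 1) []) 4 "") then
      PySem.List.slice body none (some (-1))
    else body
  else body

-- out += body
def depagStepB (pages : List (List String)) (out : List String) (kp : Int × List String) : List String :=
  out ++ depagChunkB pages kp

def depaginate_alt (lines : List String) : List String :=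
  (PySem.List.enumerate (depagPages lines)).foldl (depagStepB (depagPages lines)) []

-- ===== PRECONDITION & SPEC =====
def Spec_depaginate (lines : List String) (out : List String) : Prop := out = depaginate_alt lines
instance (lines : List String) (out : List String) : Decidable (Spec_depaginate lines out) := by unfold Spec_depaginate; infer_instance

-- ===== CLAIM (what is proved, stated in full; the proofs are below) =====
def Claim_equal_depaginate : Prop := ∀ (lines : List String), Dom_depaginate lines → Spec_depaginate lines (depaginate lines)

-- ===== LEMMAS AND PROOFS =====

-- the lines both programs keep for the page starting at line b (proof-side reference value)
def pageSpec (lines : List String) (b : Nat) : List String :=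
  if b + 60 < lines.length ∧
      pvIndent (lines.getD (b + 51) "") = pvIndent (lines.getD (b + 60) "") then
    (lines.drop (b + 3)).take 49
  else
    (lines.drop (b + 3)).take 50

-- map of pyGetD over an index range is a drop/take window
lemma map_get_range (lines : List String) (m : Nat) : ∀ (a : Nat),
    (PySem.List.pyRange (a : Int) ((min (a + m) lines.length : Nat) : Int)).map
        (fun i => PySem.List.pyGetD lines i "")
      = (lines.drop a).take m := by
  induction m with
  | zero =>
    intro a
    rw [PySem.List.pyRange_one_eq_nil (by exact_mod_cast Nat.min_le_left a lines.length)]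
    simp
  | succ m ih =>
    intro a
    by_cases ha : a < lines.length
    · have hcons : PySem.List.pyRange (a : Int) ((min (a + (m+1)) lines.length : Nat) : Int)
          = (a : Int) :: PySem.List.pyRange ((a : Int) + 1) ((min (a + (m+1)) lines.length : Nat) : Int) := by
        apply PySem.List.pyRange_one_cons
        have : a < min (a + (m+1)) lines.length := by omega
        exact_mod_cast this
      rw [hcons, List.map_cons]
      have hc : ((a : Int) + 1) = (((a + 1 : Nat)) : Int) := by push_cast; ring
      have hm : (min (a + (m+1)) lines.length : Nat) = (min ((a+1) + m) lines.length : Nat) := by omega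
      rw [hc, hm, ih (a + 1)]
      rw [List.drop_eq_getElem_cons ha, List.take_succ_cons]
      simp [List.getD, List.getElem?_eq_getElem ha]
    · rw [PySem.List.pyRange_one_eq_nil (by
        have : min (a + (m+1)) lines.length ≤ a := by omega
        exact_mod_cast this)]
      rw [List.drop_eq_nil_of_le (by omega)]
      simp

-- line_no equals the within-page offset (b a multiple of 56)
lemma lineNo_eq (i base : Int) (h0 : 0 ≤ base) (hd : (56 : Int) ∣ base) (hlo : base ≤ i) (hhi : i < base + 56) :
    i - 56 * PySem.Int.truncdiv i 56 = i - base := by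
  have : PySem.Int.truncdiv i 56 = i / 56 := by
    simp [PySem.Int.truncdiv]
    exact Int.tdiv_eq_ediv_of_nonneg (by omega)
  rw [this]
  omega

-- A's step is the identity on indices whose within-page offset is 0,1,2,53,54,55
lemma stepA_skip (lines : List String) (acc : List String) (i base : Int)
    (h0 : 0 ≤ base) (hd : (56 : Int) ∣ base) (hlo : base ≤ i) (hhi : i < base + 56)
    (hoff : i - base < 3 ∨ 53 ≤ i - base) :
    depagStepA lines acc i = acc := by
  unfold depagStepA
  rw [lineNo_eq i base h0 hd hlo hhi]
  rw [if_neg]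
  simp only [List.mem_cons, List.not_mem_nil, or_false, not_or]
  omega

-- A's step is a plain append on within-page offsets 3..51
lemma stepA_append (lines : List String) (acc : List String) (i base : Int)
    (h0 : 0 ≤ base) (hd : (56 : Int) ∣ base) (hlo : base + 3 ≤ i) (hhi : i < base + 52) :
    depagStepA lines acc i = acc ++ [PySem.List.pyGetD lines i ""] := by
  unfold depagStepA
  rw [lineNo_eq i base h0 hd (by omega) (by omega)]
  rw [if_pos (by simp only [List.mem_cons, List.not_mem_nil, or_false]; omega)]
  rw [if_neg (by omega)]

-- one page of A's flat loop produces pageSpec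
lemma A_page (lines : List String) (b : Nat) (hd : 56 ∣ b) (hb : b < lines.length)
    (acc : List String) :
    (PySem.List.pyRange (b : Int) (min ((b : Int) + 56) (lines.length : Int))).foldl
        (depagStepA lines) acc
      = acc ++ pageSpec lines b := by
  set n : Int := (lines.length : Int) with hn
  have hd56 : (56 : Int) ∣ (b : Int) := by exact_mod_cast hd
  have hbn : (b : Int) < n := by rw [hn]; exact_mod_cast hb
  set p1 : Int := min ((b : Int) + 3) n with hp1
  set p2 : Int := min ((b : Int) + 52) n with hp2
  set p3 : Int := min ((b : Int) + 53) n with hp3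
  rw [PySem.List.pyRange_one_append (b : Int) p1 (min ((b : Int) + 56) n) (by omega) (by omega),
      PySem.List.pyRange_one_append p1 p2 (min ((b : Int) + 56) n) (by omega) (by omega),
      PySem.List.pyRange_one_append p2 p3 (min ((b : Int) + 56) n) (by omega) (by omega),
      List.foldl_append, List.foldl_append, List.foldl_append]
  -- offsets 0,1,2 dropped
  rw [PySem.List.foldl_congr_mem _ (depagStepA lines) (fun a _ => a) acc
        (by intro a x hx
            rw [PySem.List.mem_pyRange_one] at hx
            exact stepA_skip lines a x (b : Int) (by omega) hd56 (by omega) (by omega) (by omega)),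
      List.foldl_fixed]
  -- offsets 53,54,55 dropped
  rw [PySem.List.foldl_congr_mem _ (depagStepA lines) (fun a _ => a) _
        (by intro a x hx
            rw [PySem.List.mem_pyRange_one] at hx
            exact stepA_skip lines a x (b : Int) (by omega) hd56 (by omega) (by omega) (by omega)),
      List.foldl_fixed]
  -- offsets 3..51: plain appends = the 49-line window
  have hmid :
      (PySem.List.pyRange p1 p2).foldl (depagStepA lines) acc
        = acc ++ (lines.drop (b + 3)).take 49 := by
    by_cases h3 : (b : Int) + 3 ≤ n
    · have e1 : p1 = ((b + 3 : Nat) : Int) := by push_cast; omega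
      have e2 : p2 = ((min ((b + 3) + 49) lines.length : Nat) : Int) := by
        push_cast; omega
      rw [PySem.List.foldl_congr_mem _ (depagStepA lines)
            (fun a x => a ++ [PySem.List.pyGetD lines x ""]) acc
            (by intro a x hx
                rw [PySem.List.mem_pyRange_one] at hx
                exact stepA_append lines a x (b : Int) (by omega) hd56 (by omega) (by omega)),
          PySem.List.foldl_append_singleton_eq_map, e1, e2, map_get_range]
    · rw [PySem.List.pyRange_one_eq_nil (by omega), List.drop_eq_nil_of_le (by omega)]
      simp
  rw [hmid]
  -- offset 52: the page-break line, possibly dropped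
  unfold pageSpec
  by_cases h52 : (b : Int) + 52 < n
  · have e2 : p2 = (b : Int) + 52 := by omega
    have e3 : p3 = (b : Int) + 53 := by omega
    have hsingle : PySem.List.pyRange p2 p3 = [(b : Int) + 52] := by
      rw [e2, e3, PySem.List.pyRange_one_cons (by omega),
          PySem.List.pyRange_one_eq_nil (by omega)]
    rw [hsingle, List.foldl_cons, List.foldl_nil]
    unfold depagStepA
    rw [lineNo_eq ((b : Int) + 52) (b : Int) (by omega) hd56 (by omega) (by omega)]
    rw [if_pos (by simp only [List.mem_cons, List.not_mem_nil, or_false]; omega)]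
    have hidx1 : ((b : Int) + 52 - 1) = ((b + 51 : Nat) : Int) := by push_cast; ring
    have hidx2 : ((b : Int) + 52 + 8) = ((b + 60 : Nat) : Int) := by push_cast; ring
    have hidx3 : ((b : Int) + 52) = ((b + 52 : Nat) : Int) := by push_cast; ring
    have hlen52 : b + 52 < lines.length := by rw [hn] at h52; exact_mod_cast h52
    have happ : acc ++ List.take 49 (List.drop (b + 3) lines) ++ [PySem.List.pyGetD lines ((b : Int) + 52) ""]
        = acc ++ List.take 50 (List.drop (b + 3) lines) := by
      rw [hidx3, PySem.List.pyGetD_natCast, List.append_assoc]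
      congr 1
      have h49 : (lines.drop (b + 3)).take 50
          = (lines.drop (b + 3)).take 49 ++ ((lines.drop (b + 3))[49]?).toList :=
        List.take_add_one
      rw [h49]
      have hg : (lines.drop (b + 3))[49]? = some lines[b + 52] := by
        rw [List.getElem?_drop]
        exact List.getElem?_eq_getElem (by omega)
      rw [hg]
      simp [List.getD, List.getElem?_eq_getElem hlen52]
    by_cases h60 : b + 60 < lines.length
    · rw [if_pos ⟨by omega, by omega⟩]
      rw [hidx1, hidx2, PySem.List.pyGetD_natCast, PySem.List.pyGetD_natCast]
      by_cases heq : pvIndent (lines.getD (b + 51) "") = pvIndent (lines.getD (b + 60) "")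
      · rw [if_pos heq, if_pos ⟨by omega, heq⟩]
      · rw [if_neg heq, if_neg (by rintro ⟨-, h⟩; exact heq h)]
        exact happ
    · rw [if_neg (by rintro ⟨-, h⟩; omega)]
      rw [if_neg (by rintro ⟨h, -⟩; omega)]
      exact happ
  · have e23 : p3 = p2 := by omega
    rw [e23, PySem.List.pyRange_one_eq_nil (le_refl p2), List.foldl_nil]
    have hnle : lines.length ≤ b + 52 := by
      rw [hn] at h52; omega
    rw [if_neg (by rintro ⟨h, -⟩; omega)]
    have hshort : (lines.drop (b + 3)).length ≤ 49 := by
      simp [List.length_drop]; omega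
    rw [List.take_of_length_le hshort, List.take_of_length_le (by omega)]

-- A's whole flat loop, page by page
lemma A_pages (lines : List String) : ∀ (c : Nat) (j : Nat) (acc : List String),
    lines.length ≤ 56 * j + 56 * c →
    (PySem.List.pyRange ((56 * j : Nat) : Int) (lines.length : Int)).foldl
        (depagStepA lines) acc
      = acc ++ (List.range c).flatMap (fun t => pageSpec lines (56 * (j + t))) := by
  intro c
  induction c with
  | zero =>
    intro j acc hc
    rw [PySem.List.pyRange_one_eq_nil (by exact_mod_cast (by omega : lines.length ≤ 56 * j))]
    simp
  | succ c ih =>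
    intro j acc hc
    rw [List.range_succ_eq_map, List.flatMap_cons, List.flatMap_map]
    by_cases hj : 56 * j < lines.length
    · rw [PySem.List.pyRange_one_append ((56 * j : Nat) : Int)
            (min (((56 * j : Nat) : Int) + 56) (lines.length : Int)) (lines.length : Int)
            (by exact le_min (by omega) (by exact_mod_cast Nat.le_of_lt hj)) (by omega),
          List.foldl_append,
          A_page lines (56 * j) ⟨j, rfl⟩ hj acc]
      by_cases h56 : 56 * j + 56 ≤ lines.length
      · have emin : min (((56 * j : Nat) : Int) + 56) (lines.length : Int)
            = ((56 * (j + 1) : Nat) : Int) := by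
          push_cast
          have : ((56 * j + 56 : Nat) : Int) ≤ (lines.length : Int) := by exact_mod_cast h56
          push_cast at this
          omega
        rw [emin, ih (j + 1) _ (by omega)]
        rw [List.append_assoc]
        congr 2
        apply List.flatMap_congr  -- pointwise: 56*((j+1)+t) = 56*(j+(t+1))
        intro t _
        congr 1
        omega
      · have emin : min (((56 * j : Nat) : Int) + 56) (lines.length : Int)
            = (lines.length : Int) := by
          have : (lines.length : Int) ≤ ((56 * j : Nat) : Int) + 56 := by
            push_cast; exact_mod_cast (by omega : (lines.length : Int) ≤ ((56 * j + 56 : Nat) : Int))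
          omega
        rw [emin, PySem.List.pyRange_one_eq_nil (le_refl _), List.foldl_nil]
        have hnil : List.flatMap (fun a => pageSpec lines (56 * (j + a.succ))) (List.range c) = [] := by
          apply List.flatMap_eq_nil_iff.mpr
          intro t _
          unfold pageSpec
          rw [if_neg (by rintro ⟨h, -⟩; omega)]
          rw [List.drop_eq_nil_of_le (by omega)]
          simp
        rw [hnil, List.append_nil]
        norm_num
    · rw [PySem.List.pyRange_one_eq_nil (by exact_mod_cast Nat.le_of_not_lt hj)]
      rw [List.foldl_nil]
      have h0 : pageSpec lines (56 * (j + 0)) = [] := by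
        unfold pageSpec
        rw [if_neg (by rintro ⟨h, -⟩; omega)]
        rw [List.drop_eq_nil_of_le (by omega)]
        simp
      have hnil : List.flatMap (fun a => pageSpec lines (56 * (j + a.succ))) (List.range c) = [] := by
        apply List.flatMap_eq_nil_iff.mpr
        intro t _
        unfold pageSpec
        rw [if_neg (by rintro ⟨h, -⟩; omega)]
        rw [List.drop_eq_nil_of_le (by omega)]
        simp
      rw [h0, hnil]
      simp

-- number of pages
def numPages (lines : List String) : Nat := (((lines.length : Int) + 55) / 56).toNat

lemma pages_eq (lines : List String) :
    depagPages lines = (List.range (numPages lines)).map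
      (fun k => (lines.drop (56 * k)).take 56) := by
  unfold depagPages numPages
  rw [PySem.List.pyRange_of_pos 0 (lines.length : Int) (by norm_num)]
  by_cases h : (0 : Int) < (lines.length : Int)
  · rw [if_pos h, List.map_map]
    rw [show (lines.length : Int) - 0 + 56 - 1 = (lines.length : Int) + 55 from by ring]
    apply List.map_congr_left
    intro k _
    simp only [Function.comp]
    have e1 : (0 : Int) + 56 * (k : Int) = ((56 * k : Nat) : Int) := by push_cast; ring
    have e2 : (0 : Int) + 56 * (k : Int) + 56 = ((56 * k + 56 : Nat) : Int) := by push_cast; ring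
    rw [e1]
    rw [show ((56 * k : Nat) : Int) + 56 = ((56 * k + 56 : Nat) : Int) by push_cast; ring]
    rw [PySem.List.slice_natCast]
    congr 1
    omega
  · rw [if_neg h]
    have : lines.length = 0 := by omega
    rw [this]
    norm_num

lemma numPages_pos_iff (lines : List String) (k : Nat) :
    k < numPages lines ↔ 56 * k < lines.length := by
  unfold numPages
  omega

-- one enumerated page of B produces pageSpec
lemma B_page (lines : List String) (k : Nat) (hk : k < numPages lines) :
    depagChunkB (depagPages lines)
        ((k : Int), PySem.List.pyGetD (depagPages lines) (k : Int) [])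
      = pageSpec lines (56 * k) := by
  have hkn : 56 * k < lines.length := (numPages_pos_iff lines k).mp hk
  rw [pages_eq]
  unfold depagChunkB
  simp only [PySem.List.pyGetD_natCast]
  have hcast : ((k : Int) + 1) = ((k + 1 : Nat) : Int) := by push_cast; ring
  rw [hcast, PySem.List.pyGetD_natCast]
  have hlenp : ((List.range (numPages lines)).map
      (fun k => (lines.drop (56 * k)).take 56)).length = numPages lines := by simp
  have hgetk : ((List.range (numPages lines)).map
      (fun k => (lines.drop (56 * k)).take 56)).getD k [] = (lines.drop (56 * k)).take 56 :=
    PySem.List.getD_map_range _ _ _ _ hk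
  rw [hgetk, hlenp]
  -- the guard is exactly "56k+60 < len"
  have hbody : PySem.List.slice ((lines.drop (56 * k)).take 56) (some 3) (some 53)
      = (lines.drop (56 * k + 3)).take 50 := by
    rw [PySem.List.slice_toNat _ (by norm_num) (by norm_num)]
    rw [List.drop_take, List.take_take, List.drop_drop]
    simp
  by_cases h60 : 56 * k + 60 < lines.length
  · have hk1 : k + 1 < numPages lines := (numPages_pos_iff lines (k + 1)).mpr (by omega)
    have hgetk1 : ((List.range (numPages lines)).map
        (fun k => (lines.drop (56 * k)).take 56)).getD (k + 1) [] =
        (lines.drop (56 * (k + 1))).take 56 := PySem.List.getD_map_range _ _ _ _ hk1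
    rw [hgetk1]
    rw [if_pos ⟨by exact_mod_cast hk1, by
      rw [List.length_take, List.length_drop]; omega⟩]
    -- page[51] = lines[56k+51], next[4] = lines[56k+60]
    have hfull : 51 < ((lines.drop (56 * k)).take 56).length := by
      rw [List.length_take, List.length_drop]; omega
    have hnextlen : 4 < ((lines.drop (56 * (k + 1))).take 56).length := by
      rw [List.length_take, List.length_drop]; omega
    have e51 : PySem.List.pyGetD ((lines.drop (56 * k)).take 56) 51 "" = lines.getD (56 * k + 51) "" := by
      rw [show (51 : Int) = ((51 : Nat) : Int) by norm_num, PySem.List.pyGetD_natCast]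
      rw [List.getD_eq_getElem _ _ hfull, List.getElem_take, List.getElem_drop]
      rw [List.getD_eq_getElem _ _ (by omega)]
    have e60 : PySem.List.pyGetD ((lines.drop (56 * (k + 1))).take 56) 4 "" = lines.getD (56 * k + 60) "" := by
      rw [show (4 : Int) = ((4 : Nat) : Int) by norm_num, PySem.List.pyGetD_natCast]
      rw [List.getD_eq_getElem _ _ hnextlen, List.getElem_take, List.getElem_drop]
      rw [List.getD_eq_getElem _ _ (by omega)]
      congr 1
    rw [e51, e60, hbody]
    unfold pageSpec
    by_cases heq : pvIndent (lines.getD (56 * k + 51) "") = pvIndent (lines.getD (56 * k + 60) "")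
    · rw [if_pos heq, if_pos ⟨h60, heq⟩]
      rw [PySem.List.slice_to_neg_one, List.dropLast_eq_take]
      rw [List.take_take]
      congr 1
      rw [List.length_take, List.length_drop]
      omega
    · rw [if_neg heq, if_neg (by rintro ⟨-, h⟩; exact heq h)]
  · rw [if_neg (by
      rintro ⟨h1, h2⟩
      have hk1 : k + 1 < numPages lines := by exact_mod_cast h1
      have := PySem.List.getD_map_range (fun k => (lines.drop (56 * k)).take 56)
        (numPages lines) (k + 1) [] hk1
      rw [this] at h2
      rw [List.length_take, List.length_drop] at h2
      have : 56 * (k + 1) + 5 ≤ lines.length := by omega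
      omega)]
    rw [hbody]
    unfold pageSpec
    rw [if_neg (by rintro ⟨h, -⟩; omega)]

-- B's foldl over the enumerated pages, flattened
lemma B_flat (lines : List String) :
    depaginate_alt lines
      = (List.range (numPages lines)).flatMap (fun k => pageSpec lines (56 * k)) := by
  unfold depaginate_alt depagStepB
  rw [PySem.List.foldl_append_eq_flatMap, List.nil_append]
  rw [PySem.List.enumerate_eq_map_pyRange (depagPages lines) ([] : List String)]
  have hlen : PySem.List.len (depagPages lines) = ((depagPages lines).length : Int) := by
    simp [PySem.List.len]
  rw [hlen]
  have hP : (depagPages lines).length = numPages lines := by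
    rw [pages_eq]; simp
  rw [hP, PySem.List.pyRange_zero_natCast, List.map_map, List.flatMap_map]
  apply List.flatMap_congr
  intro k hk
  rw [Function.comp]
  exact B_page lines k (List.mem_range.mp hk)

-- ===== VERDICT (by name: the statement is the Claim_ definition above) =====
theorem depaginate_spec : Claim_equal_depaginate := by
  intro lines _
  show depaginate lines = depaginate_alt lines
  unfold depaginate
  have h0 : ((0 : Int)) = ((56 * 0 : Nat) : Int) := by norm_num
  rw [h0, A_pages lines (numPages lines) 0 [] (by unfold numPages; omega), List.nil_append,
      B_flat lines]
  apply List.flatMap_congr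
  intro t _
  congr 1
  omega
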